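-- pv_equiv track=rewrite | github.com/sagarverma/MAPEL | utils/dataloader.py | get_sequence_list
-- ===== SOURCE A (Python) =====
-- def get_sequence_list(root, run_ids, history_length):
--     sequence_lists = []
--     for run_id in run_ids:
--         runlen = list(range(int(run_id[1])))
--         history_runlen = [0 for x in range(history_length)] + runlen
--
--         for i in range(history_length+1,len(history_runlen)+1):
--             sequence_lists.append([root + run_id[0], history_runlen[i-history_length:i]])
--
--     return sequence_lists
-- ===== SOURCE B (Python) =====
-- def get_sequence_list(root, run_ids, history_length):
--     sequence_lists = []
--     for name, num in run_ids:
--         prefix = root + name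
--         for k in range(int(num)):
--             sequence_lists.append([prefix,
--                 [max(0, m) for m in range(k - history_length + 1, k + 1)]])
--     return sequence_lists
-- ===== Notes on version B (the rewrite author's own statement) =====
-- stated objective: simpler
-- what changed: B drops A's padded history_runlen array and its re-slicing: each window is produced directly by the closed form [max(0, m) for m in range(k - history_length + 1, k + 1)], so no per-run auxiliary list is built or sliced.
-- outside the precondition, e.g. on get_sequence_list('', [('x', 1)], -1): A returns [('x', []), ('x', [])], B returns [('x', [])]
import Mathlib
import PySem

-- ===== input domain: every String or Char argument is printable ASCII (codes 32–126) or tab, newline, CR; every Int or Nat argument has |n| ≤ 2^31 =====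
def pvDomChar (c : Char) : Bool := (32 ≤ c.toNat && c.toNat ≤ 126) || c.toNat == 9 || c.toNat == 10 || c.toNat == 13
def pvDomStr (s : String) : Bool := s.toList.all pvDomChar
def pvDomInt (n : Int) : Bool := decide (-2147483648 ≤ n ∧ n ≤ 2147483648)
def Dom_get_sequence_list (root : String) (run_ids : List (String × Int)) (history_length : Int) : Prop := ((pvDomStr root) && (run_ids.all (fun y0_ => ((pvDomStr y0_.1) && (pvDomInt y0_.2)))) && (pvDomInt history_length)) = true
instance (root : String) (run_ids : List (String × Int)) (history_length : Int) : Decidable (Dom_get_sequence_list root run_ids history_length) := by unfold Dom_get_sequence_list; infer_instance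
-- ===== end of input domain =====

-- B replaces A's padded history list and its re-slicing by a direct closed-form window
-- per index (objective: simpler); equal on every input with history_length ≥ 0.

-- ===== PORT A =====
def get_sequence_list (root : String) (run_ids : List (String × Int)) (history_length : Int) : List (String × List Int) :=
  run_ids.foldl (fun sequence_lists run_id =>
    let runlen := PySem.List.pyRange 0 run_id.2
    let history_runlen := (PySem.List.pyRange 0 history_length).map (fun _ => (0 : Int)) ++ runlen
    (PySem.List.pyRange (history_length + 1) ((history_runlen.length : Int) + 1)).foldl
      (fun acc i => acc ++ [(root ++ run_id.1, PySem.List.slice history_runlen (some (i - history_length)) (some i))])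
      sequence_lists) []

-- ===== PORT B =====
def get_sequence_list_alt (root : String) (run_ids : List (String × Int)) (history_length : Int) : List (String × List Int) :=
  run_ids.foldl (fun sequence_lists run_id =>
    let pfx := root ++ run_id.1
    (PySem.List.pyRange 0 run_id.2).foldl
      (fun acc k => acc ++ [(pfx, (PySem.List.pyRange (k - history_length + 1) (k + 1)).map (fun m => max 0 m))])
      sequence_lists) []

-- ===== PRECONDITION & SPEC =====
-- Pre_ restricts to the natural domain history_length ≥ 0: for a negative history length A
-- still returns, but its windows come from Python slices with negative bounds wrapping around
-- the run list — an artefact no caller of a 'history length' would specify.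
def Pre_get_sequence_list (root : String) (run_ids : List (String × Int)) (history_length : Int) : Prop :=
  0 ≤ history_length
instance (root : String) (run_ids : List (String × Int)) (history_length : Int) : Decidable (Pre_get_sequence_list root run_ids history_length) := by unfold Pre_get_sequence_list; infer_instance

def pvWitness_get_sequence_list : String × (List (String × Int)) × Int := ("r", [("x", 2), ("y", 1)], 1)

def Spec_get_sequence_list (root : String) (run_ids : List (String × Int)) (history_length : Int) (out : List (String × List Int)) : Prop := out = get_sequence_list_alt root run_ids history_length
instance (root : String) (run_ids : List (String × Int)) (history_length : Int) (out : List (String × List Int)) : Decidable (Spec_get_sequence_list root run_ids history_length out) := by unfold Spec_get_sequence_list; infer_instance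

-- ===== CLAIM (what is proved, stated in full; the proofs are below) =====
def Claim_equal_get_sequence_list : Prop := ∀ (root : String) (run_ids : List (String × Int)) (history_length : Int), Dom_get_sequence_list root run_ids history_length → Pre_get_sequence_list root run_ids history_length → Spec_get_sequence_list root run_ids history_length (get_sequence_list root run_ids history_length)

-- ===== LEMMAS AND PROOFS =====

-- A's slice of the zero-padded run list equals B's clamped closed-form window.
lemma pv_window (H N k : Nat) (hk : k < N) :
    PySem.List.slice (List.replicate H (0 : Int) ++ (List.range N).map (fun j : Nat => (j : Int)))
        (some ((k : Int) + 1)) (some ((k : Int) + 1 + (H : Int)))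
    = (List.range H).map (fun t : Nat => max 0 ((k : Int) - (H : Int) + 1 + (t : Int))) := by
  have h2 : ((k : Int) + 1 + (H : Int)) = ((k + 1 : Nat) : Int) + ((H : Nat) : Int) := by push_cast; ring
  have h1 : ((k : Int) + 1) = ((k + 1 : Nat) : Int) := by push_cast; ring
  rw [h2, h1, PySem.List.slice_natCast_add]
  apply List.ext_getElem
  · simp [List.length_take, List.length_drop]
    omega
  · intro t ht1 ht2
    simp only [List.length_take, List.length_drop, List.length_append, List.length_replicate,
      List.length_map, List.length_range] at ht1
    rw [List.getElem_take, List.getElem_drop]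
    rw [List.getElem_map, List.getElem_range]
    by_cases hc : k + 1 + t < H
    · rw [List.getElem_append_left (by simpa using hc)]
      rw [List.getElem_replicate]
      have : (k : Int) - (H : Int) + 1 + (t : Int) ≤ 0 := by omega
      simp [max_eq_left this]
    · rw [List.getElem_append_right (by simpa using hc)]
      simp only [List.length_replicate, List.getElem_map, List.getElem_range]
      have : (0 : Int) ≤ (k : Int) - (H : Int) + 1 + (t : Int) := by omega
      rw [max_eq_right this]
      omega

-- per-run equality of the two inner loops, for any accumulator
lemma pv_run (pfx : String) (h n : Int) (hh : 0 ≤ h) (acc : List (String × List Int)) :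
    (PySem.List.pyRange (h + 1)
        (((((PySem.List.pyRange 0 h).map (fun _ => (0 : Int)) ++ PySem.List.pyRange 0 n).length : Nat) : Int) + 1)).foldl
      (fun a i => a ++ [(pfx, PySem.List.slice ((PySem.List.pyRange 0 h).map (fun _ => (0 : Int)) ++ PySem.List.pyRange 0 n)
        (some (i - h)) (some i))]) acc
    = (PySem.List.pyRange 0 n).foldl
        (fun a k => a ++ [(pfx, (PySem.List.pyRange (k - h + 1) (k + 1)).map (fun m => max 0 m))]) acc := by
  obtain ⟨H, rfl⟩ : ∃ H : Nat, h = (H : Int) := ⟨h.toNat, (Int.toNat_of_nonneg hh).symm⟩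
  have hzero : (PySem.List.pyRange 0 (H : Int)).map (fun _ => (0 : Int)) = List.replicate H (0 : Int) := by
    rw [List.map_const', PySem.List.length_pyRange_one]
    norm_num
  by_cases hn : n ≤ 0
  · rw [hzero, PySem.List.pyRange_one_eq_nil hn]
    rw [PySem.List.pyRange_one_eq_nil (by simp)]
    simp
  · obtain ⟨N, rfl⟩ : ∃ N : Nat, n = (N : Int) := ⟨n.toNat, (Int.toNat_of_nonneg (by omega)).symm⟩
    rw [hzero]
    have hrn : PySem.List.pyRange 0 (N : Int) = (List.range N).map (fun j : Nat => (j : Int)) := by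
      rw [PySem.List.pyRange_one]
      simp
    have hlen : ((((List.replicate H (0 : Int) ++ PySem.List.pyRange 0 (N : Int)).length : Nat) : Int) + 1)
        = (H : Int) + (N : Int) + 1 := by
      rw [hrn]; simp
    have hra : PySem.List.pyRange ((H : Int) + 1) ((H : Int) + (N : Int) + 1)
        = (List.range N).map (fun t : Nat => (H : Int) + 1 + (t : Int)) := by
      have hN : (((H : Int) + (N : Int) + 1) - ((H : Int) + 1)).toNat = N := by omega
      rw [PySem.List.pyRange_one, hN]
    rw [hlen, hra, hrn, PySem.List.foldl_append_singleton_eq_map, PySem.List.foldl_append_singleton_eq_map]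
    congr 1
    rw [List.map_map, List.map_map]
    apply List.map_congr_left
    intro t ht
    have htN : t < N := List.mem_range.mp ht
    simp only [Function.comp]
    congr 1
    have e1 : (H : Int) + 1 + (t : Int) - (H : Int) = (t : Int) + 1 := by ring
    have e2 : (H : Int) + 1 + (t : Int) = (t : Int) + 1 + (H : Int) := by ring
    rw [e1, e2, pv_window H N t htN]
    have e3 : PySem.List.pyRange ((t : Int) - (H : Int) + 1) ((t : Int) + 1)
        = (List.range H).map (fun s : Nat => (t : Int) - (H : Int) + 1 + (s : Int)) := by
      have hH : (((t : Int) + 1) - ((t : Int) - (H : Int) + 1)).toNat = H := by omega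
      rw [PySem.List.pyRange_one, hH]
    rw [e3, List.map_map]
    apply List.map_congr_left
    intro s _
    simp only [Function.comp]

-- ===== VERDICT (by name: the statement is the Claim_ definition above) =====
theorem get_sequence_list_spec : Claim_equal_get_sequence_list := by
  intro root run_ids history_length _ hpre
  unfold Spec_get_sequence_list get_sequence_list get_sequence_list_alt
  have : (fun (sequence_lists : List (String × List Int)) (run_id : String × Int) =>
      (PySem.List.pyRange (history_length + 1)
        (((((PySem.List.pyRange 0 history_length).map (fun _ => (0 : Int)) ++ PySem.List.pyRange 0 run_id.2).length : Nat) : Int) + 1)).foldl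
        (fun acc i => acc ++ [(root ++ run_id.1,
          PySem.List.slice ((PySem.List.pyRange 0 history_length).map (fun _ => (0 : Int)) ++ PySem.List.pyRange 0 run_id.2)
            (some (i - history_length)) (some i))]) sequence_lists)
      = (fun (sequence_lists : List (String × List Int)) (run_id : String × Int) =>
        (PySem.List.pyRange 0 run_id.2).foldl
          (fun acc k => acc ++ [(root ++ run_id.1,
            (PySem.List.pyRange (k - history_length + 1) (k + 1)).map (fun m => max 0 m))]) sequence_lists) := by
    funext acc rid
    exact pv_run (root ++ rid.1) history_length rid.2 hpre acc
  simp only [this]
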